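-- pv_equiv track=rewrite | github.com/BloxDB/wordlist | scripts/check_duplicates.py | check_cross_file_duplicates
-- ===== SOURCE A (Python) =====
-- from collections import defaultdict
--
-- def check_cross_file_duplicates(file_data):
--     word_locations = defaultdict(list)
--
--     for file_path, words in file_data.items():
--         for word, line_num in words.items():
--             word_locations[word].append((file_path, line_num))
--
--     cross_duplicates = {
--         word: locations
--         for word, locations in word_locations.items()
--         if len(locations) > 1
--     }
--
--     return cross_duplicates
-- ===== SOURCE B (Python) =====
-- from collections import Counter
--
-- def check_cross_file_duplicates(file_data):
--     counts = Counter()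
--     for words in file_data.values():
--         counts.update(words.keys())
--     result = {}
--     for file_path, words in file_data.items():
--         for word, line_num in words.items():
--             if counts[word] > 1:
--                 result.setdefault(word, []).append((file_path, line_num))
--     return result
-- ===== Notes on version B (the rewrite author's own statement) =====
-- stated objective: alternative
-- what changed: Instead of grouping all locations per word and then filtering the groups by length, B first tallies total occurrences of each word with a Counter and then replays file_data once more, appending locations only for words whose global count exceeds 1.
import Mathlib
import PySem

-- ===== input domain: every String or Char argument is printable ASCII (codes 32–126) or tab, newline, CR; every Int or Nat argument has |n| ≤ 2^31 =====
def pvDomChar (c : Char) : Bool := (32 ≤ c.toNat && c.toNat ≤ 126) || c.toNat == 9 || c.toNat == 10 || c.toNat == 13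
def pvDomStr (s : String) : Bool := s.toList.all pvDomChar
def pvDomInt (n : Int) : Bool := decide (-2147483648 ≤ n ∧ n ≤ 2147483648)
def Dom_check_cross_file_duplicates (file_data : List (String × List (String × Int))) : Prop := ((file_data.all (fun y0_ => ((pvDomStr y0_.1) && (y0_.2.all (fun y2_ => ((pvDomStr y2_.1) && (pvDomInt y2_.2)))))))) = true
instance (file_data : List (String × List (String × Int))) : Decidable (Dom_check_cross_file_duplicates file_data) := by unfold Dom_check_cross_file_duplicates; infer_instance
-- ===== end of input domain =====

-- B replaces A's group-then-filter-by-length by a global Counter pass followed by a guarded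
-- replay of file_data; same asymptotic cost, different decomposition.

-- ===== PORT A =====
-- word_locations = defaultdict(list); append (file_path, line_num) per word; keep groups with > 1 locations
def pvWordLocations (file_data : List (String × List (String × Int))) : PySem.Dict String (List (String × Int)) :=
  file_data.foldl (fun d fp_ws =>
    fp_ws.2.foldl (fun d wl => d.modify wl.1 [] (· ++ [(fp_ws.1, wl.2)])) d)
    PySem.Dict.empty

def check_cross_file_duplicates (file_data : List (String × List (String × Int))) : List (String × List (String × Int)) :=
  (pvWordLocations file_data).items.filter (fun p => decide (1 < p.2.length))

-- ===== PORT B =====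
-- counts = Counter over all words; then a second pass appends locations only for globally duplicated words
def pvCounts (file_data : List (String × List (String × Int))) : PySem.Dict String Int :=
  file_data.foldl (fun c fp_ws =>
    fp_ws.2.foldl (fun c wl => c.modify wl.1 0 (· + 1)) c)
    PySem.Dict.empty

def pvResult (file_data : List (String × List (String × Int))) : PySem.Dict String (List (String × Int)) :=
  file_data.foldl (fun r fp_ws =>
    fp_ws.2.foldl (fun r wl =>
      if 1 < (pvCounts file_data).getD wl.1 0 then r.modify wl.1 [] (· ++ [(fp_ws.1, wl.2)]) else r) r)
    PySem.Dict.empty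

def check_cross_file_duplicates_alt (file_data : List (String × List (String × Int))) : List (String × List (String × Int)) :=
  (pvResult file_data).items

-- ===== PRECONDITION & SPEC =====
def Spec_check_cross_file_duplicates (file_data : List (String × List (String × Int))) (out : List (String × List (String × Int))) : Prop := out = check_cross_file_duplicates_alt file_data
instance (file_data : List (String × List (String × Int))) (out : List (String × List (String × Int))) : Decidable (Spec_check_cross_file_duplicates file_data out) := by unfold Spec_check_cross_file_duplicates; infer_instance

-- ===== CLAIM (what is proved, stated in full; the proofs are below) =====
def Claim_equal_check_cross_file_duplicates : Prop := ∀ (file_data : List (String × List (String × Int))), Dom_check_cross_file_duplicates file_data → Spec_check_cross_file_duplicates file_data (check_cross_file_duplicates file_data)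

-- ===== LEMMAS AND PROOFS =====

-- the stream of (word, (file_path, line_num)) pairs both programs iterate over
def pvPairs (file_data : List (String × List (String × Int))) : List (String × (String × Int)) :=
  file_data.flatMap (fun fp_ws => fp_ws.2.map (fun wl => (wl.1, (fp_ws.1, wl.2))))

-- a nested fold over file_data is a fold over the pair stream
theorem pvFoldl_pairs {s : Type} (f : s → String × (String × Int) → s)
    (file_data : List (String × List (String × Int))) (init : s) :
    file_data.foldl (fun s fp_ws => fp_ws.2.foldl (fun s wl => f s (wl.1, (fp_ws.1, wl.2))) s) init
      = (pvPairs file_data).foldl f init := by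
  induction file_data generalizing init with
  | nil => rfl
  | cons hd tl ih =>
    simp only [List.foldl_cons, pvPairs, List.flatMap_cons, List.foldl_append, List.foldl_map]
    exact ih _

-- closed form of the grouping fold (defaultdict(list)-style append loop)
theorem pvGroup_items (l : List (String × (String × Int))) :
    (l.foldl (fun d p => d.modify p.1 [] (· ++ [p.2]))
        (PySem.Dict.empty : PySem.Dict String (List (String × Int)))).items
      = (PySem.Set.ofList (l.map (·.1))).map
          (fun w => (w, (l.filter (fun p => p.1 == w)).map (·.2))) := by
  have hnd : (l.foldl (fun d p => d.modify p.1 [] (· ++ [p.2]))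
      (PySem.Dict.empty : PySem.Dict String (List (String × Int)))).keys.Nodup :=
    PySem.Dict.nodup_keys_foldl_modify_key l (fun p => p.1) [] (fun _ p => (· ++ [p.2]))
      PySem.Dict.empty (by simp [PySem.Dict.keys_empty])
  have hk : (l.foldl (fun d p => d.modify p.1 [] (· ++ [p.2]))
      (PySem.Dict.empty : PySem.Dict String (List (String × Int)))).keys
      = PySem.Set.ofList (l.map (fun p => p.1)) := by
    have := PySem.Dict.keys_foldl_modify_key l (fun p => p.1) ([] : List (String × Int))
      (fun _ p => (· ++ [p.2])) PySem.Dict.empty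
    simpa [PySem.Dict.keys_empty, PySem.Set.update_nil_left] using this
  rw [PySem.Dict.items_eq_map_keys _ hnd [], hk]
  refine List.map_congr_left ?_
  intro w _
  rw [PySem.Dict.getD_foldl_modify_append, PySem.Dict.getD_empty]
  simp

-- ordered dedup commutes with filtering
theorem pvOfList_filter (P : String → Bool) (ws : List String) :
    (PySem.Set.ofList ws).filter P = PySem.Set.ofList (ws.filter P) := by
  induction ws with
  | nil => simp [PySem.Set.ofList_nil]
  | cons x xs ih =>
    rw [PySem.Set.ofList_cons]
    by_cases hP : P x = true
    · rw [List.filter_cons_of_pos hP, List.filter_cons_of_pos hP, PySem.Set.ofList_cons, ← ih]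
      simp only [PySem.Set.discard, List.filter_filter]
      congr 1
      apply List.filter_congr
      intro a _
      rw [Bool.and_comm]
    · rw [List.filter_cons_of_neg hP, List.filter_cons_of_neg hP, ← ih]
      simp only [PySem.Set.discard, List.filter_filter]
      apply List.filter_congr
      intro a _
      by_cases hax : a = x
      · subst hax; simp [hP]
      · simp [hax]

-- countP over the pair stream is count over the word stream
theorem pvCountP_eq_count (l : List (String × (String × Int))) (w : String) :
    l.countP (fun p => p.1 == w) = List.count w (l.map (fun p => p.1)) := by
  induction l with
  | nil => rfl
  | cons p l ih =>
    simp only [List.map_cons, List.countP_cons, List.count_cons, ih]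

theorem pvWL_eq (file_data : List (String × List (String × Int))) :
    pvWordLocations file_data
      = (pvPairs file_data).foldl (fun d p => d.modify p.1 [] (· ++ [p.2])) PySem.Dict.empty := by
  unfold pvWordLocations
  exact pvFoldl_pairs (fun d p => d.modify p.1 [] (· ++ [p.2])) file_data PySem.Dict.empty

theorem pvCounts_eq (file_data : List (String × List (String × Int))) :
    pvCounts file_data
      = (pvPairs file_data).foldl (fun c p => c.modify p.1 0 (· + 1)) PySem.Dict.empty := by
  unfold pvCounts
  exact pvFoldl_pairs (fun (c : PySem.Dict String Int) p => c.modify p.1 0 (· + 1)) file_data PySem.Dict.empty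

theorem pvResult_eq (file_data : List (String × List (String × Int))) :
    pvResult file_data
      = (pvPairs file_data).foldl (fun r p =>
          if 1 < (pvCounts file_data).getD p.1 0 then r.modify p.1 [] (· ++ [p.2]) else r)
          PySem.Dict.empty := by
  unfold pvResult
  exact pvFoldl_pairs (fun r p =>
    if 1 < (pvCounts file_data).getD p.1 0 then r.modify p.1 [] (· ++ [p.2]) else r)
    file_data PySem.Dict.empty

theorem check_cross_file_duplicates_eq (file_data : List (String × List (String × Int))) :
    check_cross_file_duplicates file_data = check_cross_file_duplicates_alt file_data := by
  unfold check_cross_file_duplicates check_cross_file_duplicates_alt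
  rw [pvWL_eq, pvResult_eq]
  -- the counter's value at w is the number of occurrences of w
  have hc : ∀ w : String,
      (pvCounts file_data).getD w 0
        = (List.count w ((pvPairs file_data).map (fun p => p.1)) : Int) := by
    intro w
    have hfm : (pvPairs file_data).foldl (fun c p => c.modify p.1 0 (· + 1))
          (PySem.Dict.empty : PySem.Dict String Int)
        = ((pvPairs file_data).map (fun p => p.1)).foldl (fun c x => c.modify x 0 (· + 1))
          PySem.Dict.empty := by rw [List.foldl_map]
    rw [pvCounts_eq, hfm, PySem.Dict.getD_foldl_modify_add_one, PySem.Dict.getD_empty]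
    simp
  -- the duplicated-word predicate
  set P : String → Bool := fun w => decide (1 < List.count w ((pvPairs file_data).map (fun p => p.1))) with hP
  -- B's guarded fold is the grouping fold over the filtered stream
  have hguard : ((pvPairs file_data).foldl (fun r p =>
        if 1 < (pvCounts file_data).getD p.1 0 then r.modify p.1 [] (· ++ [p.2]) else r)
        (PySem.Dict.empty : PySem.Dict String (List (String × Int))))
      = (((pvPairs file_data).filter (fun p => P p.1)).foldl
          (fun r p => r.modify p.1 [] (· ++ [p.2])) PySem.Dict.empty) := by
    rw [List.foldl_filter]
    have hfn : (fun (r : PySem.Dict String (List (String × Int))) (p : String × (String × Int)) =>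
          if 1 < (pvCounts file_data).getD p.1 0 then r.modify p.1 [] (· ++ [p.2]) else r)
        = (fun r p => if P p.1 = true then r.modify p.1 [] (· ++ [p.2]) else r) := by
      funext r p
      simp [hc, hP, Nat.one_lt_cast]
    rw [hfn]
  rw [hguard, pvGroup_items, pvGroup_items]
  -- left side: filter-by-length over the map is filter-by-P on the deduped keys
  rw [List.filter_map]
  have hpred : ((fun p : String × List (String × Int) => decide (1 < p.2.length)) ∘
      (fun w => (w, ((pvPairs file_data).filter (fun p => p.1 == w)).map (fun p => p.2)))) = P := by
    funext w
    simp only [Function.comp_apply, hP, ← pvCountP_eq_count, List.countP_eq_length_filter,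
      List.length_map]
  rw [hpred, pvOfList_filter]
  -- the filtered stream's word list is the filtered word list
  have hws : (((pvPairs file_data).filter (fun p => P p.1)).map (fun p => p.1))
      = ((pvPairs file_data).map (fun p => p.1)).filter P := by
    rw [List.filter_map]; rfl
  rw [hws]
  -- and per duplicated word the filtered stream has the same occurrences
  refine List.map_congr_left ?_
  intro w hw
  have hPw : P w = true := by
    rw [PySem.Set.mem_ofList] at hw
    exact (List.mem_filter.mp hw).2
  rw [List.filter_filter]
  congr 2
  apply List.filter_congr
  intro p _
  by_cases hpw : p.1 = w
  · subst hpw; simp [hPw]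
  · simp [hpw]

-- ===== VERDICT (by name: the statement is the Claim_ definition above) =====
theorem check_cross_file_duplicates_spec : Claim_equal_check_cross_file_duplicates := by
  intro fd _
  unfold Spec_check_cross_file_duplicates
  exact check_cross_file_duplicates_eq fd
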